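-- pv_equiv track=rewrite | github.com/SaadJlil/HomeCosina | DatabaseInitialization/seedScript.py | getlastint
-- ===== SOURCE A (Python) =====
-- def getlastint(string):
--     result = 0
--     new_string = string[::-1]
--     for i in range(len(new_string)):
--         try:
--             result += int(new_string[i])*(10**i)
--         except:
--             break
--     return result
-- ===== SOURCE B (Python) =====
-- def getlastint(string):
--     i = len(string)
--     while i > 0 and '0' <= string[i-1] <= '9':
--         i -= 1
--     return int(string[i:]) if i < len(string) else 0
-- ===== Notes on version B (the rewrite author's own statement) =====
-- stated objective: simpler
-- what changed: Instead of reversing the string and accumulating digit*10^i per character, B finds the start index of the trailing digit run with one backward while-loop and converts the slice with a single int() call.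
import Mathlib
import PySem

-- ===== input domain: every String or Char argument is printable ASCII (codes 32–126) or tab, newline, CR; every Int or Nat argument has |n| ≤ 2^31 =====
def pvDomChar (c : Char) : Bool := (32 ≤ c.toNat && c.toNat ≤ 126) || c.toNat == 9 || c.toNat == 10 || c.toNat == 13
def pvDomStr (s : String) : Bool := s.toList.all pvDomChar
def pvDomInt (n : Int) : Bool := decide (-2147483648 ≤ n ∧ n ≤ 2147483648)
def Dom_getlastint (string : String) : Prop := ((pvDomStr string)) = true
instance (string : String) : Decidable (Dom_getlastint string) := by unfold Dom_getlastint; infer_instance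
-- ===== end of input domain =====

-- B replaces A's reverse-and-accumulate (digit*10^i) loop by locating the trailing digit run and
-- converting it in one go (simpler decomposition; same O(n) cost). A is total, so no Pre_.

-- ===== PORT A =====
-- loop over the reversed characters with index i; int(new_string[i]) succeeds on the ASCII domain
-- exactly when the character is '0'..'9' (exact on Dom), otherwise the except-branch breaks.
def pvGoA : List Char → Nat → Int → Int
  | [], _, r => r
  | c :: cs, i, r =>
    if c.isDigit then pvGoA cs (i + 1) (r + ((c.toNat : Int) - 48) * (10 : Int) ^ i) else r

def getlastint (string : String) : Int := pvGoA string.toList.reverse 0 0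

-- ===== PORT B =====
-- the backward while-loop scanning digits from the end = takeWhile isDigit on the reversed chars;
-- int(string[i:]) on a nonempty digit string is ported by hand as the standard Horner evaluation (exact there).
def pvIntOfDigits (ds : List Char) : Int :=
  ds.foldl (fun a c => 10 * a + ((c.toNat : Int) - 48)) 0

def getlastint_alt (string : String) : Int :=
  let ds := (string.toList.reverse.takeWhile Char.isDigit).reverse
  if ds.isEmpty then 0 else pvIntOfDigits ds

-- ===== PRECONDITION & SPEC =====
def Spec_getlastint (string : String) (out : Int) : Prop := out = getlastint_alt string
instance (string : String) (out : Int) : Decidable (Spec_getlastint string out) := by unfold Spec_getlastint; infer_instance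

-- ===== CLAIM (what is proved, stated in full; the proofs are below) =====
def Claim_equal_getlastint : Prop := ∀ (string : String), Dom_getlastint string → Spec_getlastint string (getlastint string)

-- ===== LEMMAS AND PROOFS =====

-- little-endian value of a digit list
def pvW : List Char → Int
  | [] => 0
  | c :: cs => ((c.toNat : Int) - 48) + 10 * pvW cs

theorem pvGoA_eq (cs : List Char) : ∀ (i : Nat) (r : Int),
    pvGoA cs i r = r + (10 : Int) ^ i * pvW (cs.takeWhile Char.isDigit) := by
  induction cs with
  | nil => intro i r; simp [pvGoA, pvW]
  | cons c cs ih =>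
    intro i r
    by_cases h : c.isDigit
    · simp only [pvGoA, List.takeWhile, h, if_pos, ih, pvW]
      rw [pow_succ]
      ring
    · simp [pvGoA, List.takeWhile, h, pvW]

theorem pvFold_rev (l : List Char) : ∀ (a : Int),
    l.reverse.foldl (fun a c => 10 * a + ((c.toNat : Int) - 48)) a
      = a * (10 : Int) ^ l.length + pvW l := by
  induction l with
  | nil => intro a; simp [pvW]
  | cons c cs ih =>
    intro a
    simp only [List.reverse_cons, List.foldl_append, List.foldl_cons, List.foldl_nil, ih,
      List.length_cons, pvW]
    rw [pow_succ]
    ring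

-- ===== VERDICT (by name: the statement is the Claim_ definition above) =====
theorem getlastint_spec : Claim_equal_getlastint := by
  intro s _
  show getlastint s = getlastint_alt s
  set t := s.toList.reverse.takeWhile Char.isDigit with ht
  have hb : getlastint_alt s = pvW t := by
    simp only [getlastint_alt, pvIntOfDigits, ← ht]
    by_cases h : t.isEmpty
    · rw [if_pos]
      · rw [List.isEmpty_iff] at h; simp [h, pvW]
      · simpa [List.isEmpty_iff] using h
    · rw [if_neg]
      · rw [pvFold_rev]; simp
      · simpa [List.isEmpty_iff] using h
  rw [hb, getlastint, pvGoA_eq, ← ht]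
  simp
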